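-- pv_equiv track=rewrite | github.com/narien/AoC2022 | day1/Report Repair.py | sumCals
-- ===== SOURCE A (Python) =====
-- def sumCals(lines):
--     cals = set()
--     currCount = 0
--     for val in lines:
--         if val == '':
--             cals.add(currCount)
--             currCount = 0
--             continue
--
--         currCount += int(val)
--     return cals
-- ===== SOURCE B (Python) =====
-- def sumCals(lines):
--     # Partition into '' -delimited groups of ints, then collect the sums of the
--     # blank-terminated groups (the trailing unterminated group is dropped, as in A).
--     groups = [[]]
--     for val in lines:
--         if val == '':
--             groups.append([])
--         else:
--             groups[-1].append(int(val))
--     return {sum(g) for g in groups[:-1]}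
-- ===== Notes on version B (the rewrite author's own statement) =====
-- stated objective: alternative
-- what changed: Replaced the single running-accumulator loop that adds to the set at each blank line with a two-phase split-on-blank partition of the lines followed by a set comprehension summing each blank-terminated group.
import Mathlib
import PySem

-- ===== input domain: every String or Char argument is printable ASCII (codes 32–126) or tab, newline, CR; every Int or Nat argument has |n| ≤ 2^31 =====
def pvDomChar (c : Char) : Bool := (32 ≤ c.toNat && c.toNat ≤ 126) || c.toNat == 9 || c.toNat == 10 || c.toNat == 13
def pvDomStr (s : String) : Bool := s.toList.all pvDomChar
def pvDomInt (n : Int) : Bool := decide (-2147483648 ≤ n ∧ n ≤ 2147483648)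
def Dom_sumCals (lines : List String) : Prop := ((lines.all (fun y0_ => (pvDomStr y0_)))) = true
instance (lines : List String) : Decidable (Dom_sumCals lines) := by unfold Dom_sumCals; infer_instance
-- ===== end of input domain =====

-- ===== PORT A =====
-- B differs from A by decomposition: A folds once with a running sum; B first splits the
-- lines into blank-delimited groups and then sums each blank-terminated group.
def sumCals (lines : List String) : List Int :=
  (lines.foldl
    (fun (st : PySem.Set Int × Int) val =>
      if val = "" then (PySem.Set.add st.1 st.2, 0)
      else (st.1, st.2 + (PySem.Int.ofStr? val).getD 0))
    (PySem.Set.empty, 0)).1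

-- ===== PORT B =====
-- split lines into ''-delimited groups (N blanks give N+1 groups, as Source B's list of lists)
def pvSplitGroups : List String → List (List Int)
  | [] => [[]]
  | v :: rest =>
    if v = "" then [] :: pvSplitGroups rest
    else
      match pvSplitGroups rest with
      | g :: gs => ((PySem.Int.ofStr? v).getD 0 :: g) :: gs
      | [] => [[(PySem.Int.ofStr? v).getD 0]]

def sumCals_alt (lines : List String) : List Int :=
  PySem.Set.ofList (((pvSplitGroups lines).dropLast).map List.sum)

-- ===== PRECONDITION & SPEC =====
-- Pre_ excludes exactly the inputs where Python A raises ValueError: a non-blank line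
-- that int() cannot parse (both B and its port treat such inputs identically anyway).
def Pre_sumCals (lines : List String) : Prop :=
  (lines.all (fun s => s == "" || (PySem.Int.ofStr? s).isSome)) = true
instance (lines : List String) : Decidable (Pre_sumCals lines) := by unfold Pre_sumCals; infer_instance
def pvWitness_sumCals : List String := ["1", "2", "", " 3 ", "+4", "", "9"]
def Spec_sumCals (lines : List String) (out : List Int) : Prop := out = sumCals_alt lines
instance (lines : List String) (out : List Int) : Decidable (Spec_sumCals lines out) := by unfold Spec_sumCals; infer_instance

-- ===== CLAIM (what is proved, stated in full; the proofs are below) =====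
def Claim_equal_sumCals : Prop := ∀ (lines : List String), Dom_sumCals lines → Pre_sumCals lines → Spec_sumCals lines (sumCals lines)

-- ===== LEMMAS AND PROOFS =====
-- the sums of the blank-terminated groups, with c carried into the first group
def pvCompleted (c : Int) : List String → List Int
  | [] => []
  | v :: rest => if v = "" then c :: pvCompleted 0 rest
                 else pvCompleted (c + (PySem.Int.ofStr? v).getD 0) rest

def pvAddFirst (c : Int) : List Int → List Int
  | [] => []
  | x :: xs => (c + x) :: xs

lemma pvSplitGroups_ne_nil (lines : List String) : pvSplitGroups lines ≠ [] := by
  cases lines with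
  | nil => simp [pvSplitGroups]
  | cons v rest =>
    simp only [pvSplitGroups]
    split
    · simp
    · split <;> simp

lemma pvFoldA (lines : List String) (s : PySem.Set Int) (c : Int) :
    (lines.foldl
      (fun (st : PySem.Set Int × Int) val =>
        if val = "" then (PySem.Set.add st.1 st.2, 0)
        else (st.1, st.2 + (PySem.Int.ofStr? val).getD 0))
      (s, c)).1 = PySem.Set.update s (pvCompleted c lines) := by
  induction lines generalizing s c with
  | nil => simp [pvCompleted, PySem.Set.update]
  | cons v rest ih =>
    simp only [List.foldl_cons, pvCompleted]
    by_cases h : v = "" <;> simp [h, ih, PySem.Set.update]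

lemma pvCompleted_eq (lines : List String) (c : Int) :
    pvCompleted c lines =
      pvAddFirst c (((pvSplitGroups lines).dropLast).map List.sum) := by
  induction lines generalizing c with
  | nil => simp [pvCompleted, pvSplitGroups, pvAddFirst]
  | cons v rest ih =>
    by_cases h : v = ""
    · have hne := pvSplitGroups_ne_nil rest
      simp only [pvCompleted, pvSplitGroups, h, if_pos, ih]
      rw [List.dropLast_cons_of_ne_nil hne]
      cases hgs : (pvSplitGroups rest).dropLast with
      | nil => simp [pvAddFirst]
      | cons g gs => simp [pvAddFirst]
    · obtain ⟨g, gs, hg⟩ : ∃ g gs, pvSplitGroups rest = g :: gs := by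
        cases hx : pvSplitGroups rest with
        | nil => exact absurd hx (pvSplitGroups_ne_nil rest)
        | cons a b => exact ⟨a, b, rfl⟩
      simp only [pvCompleted, pvSplitGroups, hg, ih]
      rw [if_neg h, if_neg h]
      cases gs with
      | nil => simp [pvAddFirst]
      | cons g2 gs2 =>
        rw [List.dropLast_cons₂, List.dropLast_cons₂]
        simp [pvAddFirst, add_assoc]
-- ===== VERDICT (by name: the statement is the Claim_ definition above) =====
theorem sumCals_spec : Claim_equal_sumCals := by
  intro lines _ _
  show sumCals lines = sumCals_alt lines
  unfold sumCals sumCals_alt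
  rw [pvFoldA, pvCompleted_eq]
  cases hgs : (pvSplitGroups lines).dropLast with
  | nil => simp [pvAddFirst, PySem.Set.update, PySem.Set.ofList]
  | cons g gs => simp [pvAddFirst, PySem.Set.update, PySem.Set.ofList]
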